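-- pv_equiv track=rewrite | github.com/aaronortiz/AlgorithmPractice | python/torque.py | classifyCitiesByRoadFreq
-- ===== SOURCE A (Python) =====
-- def sortDictByKeys(dict):
--     newDict = {}
--     keys = sorted(dict)
--     for key in keys:
--         newDict[key] = dict[key]
--     return newDict
--
-- def classifyCitiesByRoadFreq(cities):
--     roadsPerCity = {}
--     citiesByRoadFreq = {}
--
--     for road in cities:
--         if road[0] in roadsPerCity:
--             roadsPerCity[road[0]] += 1
--         else:
--             roadsPerCity[road[0]] = 1
--
--         if road[1] in roadsPerCity:
--             roadsPerCity[road[1]] += 1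
--         else:
--             roadsPerCity[road[1]] = 1
--
--     for city in roadsPerCity:
--         if not roadsPerCity[city] in citiesByRoadFreq:
--             citiesByRoadFreq[roadsPerCity[city]] = []
--         citiesByRoadFreq[roadsPerCity[city]].append(city)
--
--     return sortDictByKeys(citiesByRoadFreq)
-- ===== SOURCE B (Python) =====
-- def classifyCitiesByRoadFreq(cities):
--     # B: one counting pass, then a single stable sort of (city, freq) pairs by
--     # frequency, then group consecutive equal frequencies -- no bucket dict and
--     # no final key sort.
--     counts = {}
--     for road in cities:
--         counts[road[0]] = counts.get(road[0], 0) + 1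
--         counts[road[1]] = counts.get(road[1], 0) + 1
--     ordered = sorted(counts.items(), key=lambda kv: kv[1])
--     result = {}
--     while ordered:
--         f = ordered[0][1]
--         result[f] = [c for c, g in ordered if g == f]
--         ordered = [(c, g) for c, g in ordered if g != f]
--     return result
-- ===== Notes on version B (the rewrite author's own statement) =====
-- stated objective: alternative
-- what changed: A buckets cities into a dict keyed by frequency and then sorts the keys and rebuilds the dict; B instead stably sorts the (city, frequency) pairs by frequency once and groups consecutive equal frequencies, so the bucket dict and the final key-sort pass disappear.
import Mathlib
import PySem

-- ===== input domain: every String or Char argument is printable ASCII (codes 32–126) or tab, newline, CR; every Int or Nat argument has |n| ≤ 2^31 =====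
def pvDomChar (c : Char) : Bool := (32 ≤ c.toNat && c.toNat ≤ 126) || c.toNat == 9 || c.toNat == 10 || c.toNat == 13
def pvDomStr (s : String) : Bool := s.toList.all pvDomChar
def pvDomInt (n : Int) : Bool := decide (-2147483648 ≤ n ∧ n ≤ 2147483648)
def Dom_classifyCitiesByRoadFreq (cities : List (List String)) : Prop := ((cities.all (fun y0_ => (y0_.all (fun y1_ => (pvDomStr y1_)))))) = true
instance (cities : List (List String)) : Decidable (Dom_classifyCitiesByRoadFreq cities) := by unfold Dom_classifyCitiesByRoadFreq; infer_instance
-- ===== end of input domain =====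

-- B replaces A's bucket-dict-then-key-sort with one stable sort of the (city, freq)
-- pairs followed by grouping of equal frequencies (objective: alternative, same cost).

-- ===== PORT A =====
-- the  if k in d: d[k] += 1 else: d[k] = 1  block A performs for each road endpoint
def pvUpdA (d : PySem.Dict String Int) (k : String) : PySem.Dict String Int :=
  if d.contains k then d.insert k (d.getD k 0 + 1) else d.insert k 1

-- one step of A's second loop: ensure the bucket exists, then append the city
def pvBucketStep (d : PySem.Dict Int (List String)) (p : String × Int) :
    PySem.Dict Int (List String) :=
  let d0 := if !(d.contains p.2) then d.insert p.2 [] else d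
  d0.insert p.2 (d0.getD p.2 [] ++ [p.1])

-- A's helper sortDictByKeys
def pvSortDictByKeys (d : PySem.Dict Int (List String)) : PySem.Dict Int (List String) :=
  (PySem.List.sorted d.keys (fun k => k) false).foldl
    (fun nd k => nd.insert k (d.getD k [])) PySem.Dict.empty

def classifyCitiesByRoadFreq (cities : List (List String)) : List (Int × List String) :=
  let roadsPerCity := cities.foldl
    (fun d road => pvUpdA (pvUpdA d (PySem.List.pyGetD road 0 ""))
                          (PySem.List.pyGetD road 1 "")) PySem.Dict.empty
  let citiesByRoadFreq := roadsPerCity.items.foldl pvBucketStep PySem.Dict.empty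
  (pvSortDictByKeys citiesByRoadFreq).items

-- ===== PORT B =====
-- the  d[k] = d.get(k, 0) + 1  step B performs for each road endpoint
def pvUpdB (d : PySem.Dict String Int) (k : String) : PySem.Dict String Int :=
  d.insert k (d.getD k 0 + 1)

-- B's grouping loop: peel off all pairs carrying the first (minimal) frequency
def pvGroupRuns : List (String × Int) → List (Int × List String)
  | [] => []
  | (c, f) :: rest =>
      (f, (((c, f) :: rest).filter (fun p => p.2 == f)).map Prod.fst)
        :: pvGroupRuns (((c, f) :: rest).filter (fun p => p.2 != f))
termination_by qs => qs.length
decreasing_by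
  simp only [List.filter]
  have : (f != f) = false := by simp
  rw [this]
  exact Nat.lt_succ_of_le (List.length_filter_le _ _)

def classifyCitiesByRoadFreq_alt (cities : List (List String)) : List (Int × List String) :=
  let counts := cities.foldl
    (fun d road => pvUpdB (pvUpdB d (PySem.List.pyGetD road 0 ""))
                          (PySem.List.pyGetD road 1 "")) PySem.Dict.empty
  pvGroupRuns (PySem.List.sorted counts.items (fun p => p.2) false)

-- ===== PRECONDITION & SPEC =====
-- Pre_ excludes exactly the inputs containing a road with fewer than two entries,
-- on which the Python A raises IndexError at road[0]/road[1].
def Pre_classifyCitiesByRoadFreq (cities : List (List String)) : Prop :=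
  ∀ road ∈ cities, 2 ≤ road.length
instance (cities : List (List String)) : Decidable (Pre_classifyCitiesByRoadFreq cities) := by
  unfold Pre_classifyCitiesByRoadFreq; infer_instance

def pvWitness_classifyCitiesByRoadFreq : List (List String) :=
  [["a", "b"], ["a", "c"], ["b", "b"]]

def Spec_classifyCitiesByRoadFreq (cities : List (List String)) (out : List (Int × List String)) : Prop := out = classifyCitiesByRoadFreq_alt cities
instance (cities : List (List String)) (out : List (Int × List String)) : Decidable (Spec_classifyCitiesByRoadFreq cities out) := by unfold Spec_classifyCitiesByRoadFreq; infer_instance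

-- ===== CLAIM (what is proved, stated in full; the proofs are below) =====
def Claim_equal_classifyCitiesByRoadFreq : Prop := ∀ (cities : List (List String)), Dom_classifyCitiesByRoadFreq cities → Pre_classifyCitiesByRoadFreq cities → Spec_classifyCitiesByRoadFreq cities (classifyCitiesByRoadFreq cities)

-- ===== LEMMAS AND PROOFS =====

-- the two endpoint-counting steps agree
theorem pvUpdA_eq_updB : pvUpdA = pvUpdB := by
  funext d k
  unfold pvUpdA pvUpdB
  by_cases h : d.contains k = true
  · simp [h]
  · have h' : d.contains k = false := by simpa using h
    rw [PySem.Dict.getD_of_not_contains _ _ h']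
    simp [h']

-- ===== bucket loop characterisation =====
theorem pvBucketStep_keys (d : PySem.Dict Int (List String)) (p : String × Int) :
    (pvBucketStep d p).keys = PySem.Set.add d.keys p.2 := by
  unfold pvBucketStep
  by_cases h : d.contains p.2 = true
  · rw [if_neg (by simp [h]), PySem.Dict.keys_insert_of_contains _ _ h,
      PySem.Set.add_of_mem ((PySem.Dict.contains_iff_mem_keys _ _).mp h)]
  · have h' : d.contains p.2 = false := by simpa using h
    rw [if_pos (by simp [h']),
      PySem.Dict.keys_insert_of_contains _ _ (PySem.Dict.contains_insert_self _ _ _),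
      PySem.Dict.keys_insert_of_not_contains _ _ h',
      PySem.Set.add_of_not_mem (fun hm => by
        simp [(PySem.Dict.contains_iff_mem_keys d p.2).mpr hm] at h')]

theorem pvBucket_keys (ps : List (String × Int)) (d : PySem.Dict Int (List String)) :
    (ps.foldl pvBucketStep d).keys = PySem.Set.update d.keys (ps.map (·.2)) := by
  induction ps generalizing d with
  | nil => rfl
  | cons p ps ih =>
      simp only [List.foldl_cons, List.map_cons, PySem.Set.update_cons, ih, pvBucketStep_keys]

theorem pvBucketStep_getD (d : PySem.Dict Int (List String)) (p : String × Int) (f : Int) :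
    (pvBucketStep d p).getD f [] =
      if p.2 = f then d.getD f [] ++ [p.1] else d.getD f [] := by
  unfold pvBucketStep
  by_cases h : d.contains p.2 = true
  · rw [if_neg (by simp [h]), PySem.Dict.getD_insert]
    by_cases hf : f = p.2
    · subst hf; simp
    · simp [hf, Ne.symm hf]
  · have h' : d.contains p.2 = false := by simpa using h
    rw [if_pos (by simp [h']), PySem.Dict.getD_insert]
    by_cases hf : f = p.2
    · subst hf
      simp [PySem.Dict.getD_insert_self, PySem.Dict.getD_of_not_contains _ _ h']
    · rw [if_neg hf, PySem.Dict.getD_insert_of_ne _ _ _ hf, if_neg (Ne.symm hf)]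

theorem pvBucket_getD (ps : List (String × Int)) (d : PySem.Dict Int (List String)) (f : Int) :
    (ps.foldl pvBucketStep d).getD f [] =
      d.getD f [] ++ (ps.filter (fun p => p.2 == f)).map Prod.fst := by
  induction ps generalizing d with
  | nil => simp
  | cons p ps ih =>
      simp only [List.foldl_cons, ih, pvBucketStep_getD, List.filter_cons]
      by_cases h : p.2 = f
      · simp [h]
      · simp [h]

-- sortDictByKeys on a nodup-keyed dict lists the sorted keys with their values
theorem pvSortDictByKeys_items (d : PySem.Dict Int (List String)) (hnd : d.keys.Nodup) :
    (pvSortDictByKeys d).items =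
      (PySem.List.sorted d.keys (fun k => k) false).map (fun k => (k, d.getD k [])) := by
  unfold pvSortDictByKeys
  have h := PySem.Dict.items_foldl_insert_fresh
    (l := PySem.List.sorted d.keys (fun k => k) false)
    (k := fun k => k) (v := fun k => d.getD k []) PySem.Dict.empty
    (by intro a _; exact PySem.Dict.contains_empty a)
    (by simpa using ((PySem.List.sorted_perm d.keys (fun k => k) false).nodup_iff).mpr hnd)
  simpa using h

-- ===== stability of the sort =====
theorem pvFilter_insertBy (x : String × Int) (ys : List (String × Int))
    (h : ys.Pairwise (fun a b => a.2 ≤ b.2)) (f : Int) :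
    ((PySem.List.insertBy (fun a b => decide (a.2 < b.2)) x ys).filter (fun p => p.2 == f))
      = ys.filter (fun p => p.2 == f) ++ (if x.2 == f then [x] else []) := by
  induction ys with
  | nil => by_cases hxf : x.2 = f <;> simp [PySem.List.insertBy, List.filter, hxf]
  | cons y ys ih =>
      rw [List.pairwise_cons] at h
      unfold PySem.List.insertBy
      by_cases hlt : x.2 < y.2
      · simp only [decide_eq_true_eq, if_pos hlt]
        have hnone : (y :: ys).filter (fun p => p.2 == f) = []
            ∨ ¬ (x.2 == f) = true := by
          by_cases hxf : (x.2 == f) = true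
          · left
            apply List.filter_eq_nil_iff.mpr
            intro p hp
            have hyp : y.2 ≤ p.2 := by
              rcases List.mem_cons.mp hp with rfl | hp'
              · exact le_refl _
              · exact h.1 p hp'
            have : f < p.2 := lt_of_lt_of_le (by
              have := of_decide_eq_true hxf
              omega) hyp
            simp only [beq_iff_eq]
            omega
          · right; exact hxf
        rcases hnone with hnil | hxf
        · rw [List.filter_cons]
          simp only [hnil]
          by_cases hxf : (x.2 == f) = true
          · simp [hxf]
          · simp [hxf]
        · rw [List.filter_cons]
          simp [hxf]
      · simp only [decide_eq_true_eq, if_neg hlt]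
        rw [List.filter_cons, List.filter_cons, ih h.2]
        by_cases hy : (y.2 == f) = true
        · simp [hy]
        · simp [hy]

theorem pvSorted_append_singleton (ps : List (String × Int)) (x : String × Int) :
    PySem.List.sorted (ps ++ [x]) (fun p => p.2) false
      = PySem.List.insertBy (fun a b => decide (a.2 < b.2)) x
          (PySem.List.sorted ps (fun p => p.2) false) := by
  rw [PySem.List.sorted_eq_foldl_insertBy, PySem.List.sorted_eq_foldl_insertBy,
    List.foldl_append]
  rfl

theorem pvSorted_filter (ps : List (String × Int)) (f : Int) :
    (PySem.List.sorted ps (fun p => p.2) false).filter (fun p => p.2 == f)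
      = ps.filter (fun p => p.2 == f) := by
  induction ps using List.reverseRecOn with
  | nil => rfl
  | append_singleton ps x ih =>
      rw [pvSorted_append_singleton,
        pvFilter_insertBy x _ (PySem.List.sorted_pairwise ps (fun p => p.2)) f,
        ih, List.filter_append]
      by_cases hxf : x.2 = f
      · simp [List.filter, hxf]
      · have hb : (x.2 == f) = false := by simpa using hxf
        simp [List.filter, hb]

-- ===== grouping characterisation =====
theorem pvOfList_filter (q : Int → Bool) (l : List Int) :
    PySem.Set.ofList (l.filter q) = (PySem.Set.ofList l).filter q := by
  induction l with
  | nil => rfl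
  | cons x xs ih =>
      rw [List.filter_cons]
      by_cases hx : q x = true
      · rw [if_pos hx, PySem.Set.ofList_cons, PySem.Set.ofList_cons, ih]
        unfold PySem.Set.discard
        rw [List.filter_cons, if_pos hx, List.filter_comm]
      · have hx' : q x = false := by simpa using hx
        rw [if_neg (by simp [hx']), ih, PySem.Set.ofList_cons]
        unfold PySem.Set.discard
        rw [List.filter_cons, if_neg (by simp [hx']), List.filter_comm]
        symm
        apply List.filter_eq_self.mpr
        intro a ha
        have haq : q a = true := (List.mem_filter.mp ha).2
        have : a ≠ x := fun hax => by rw [hax, hx'] at haq; exact Bool.false_ne_true haq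
        simp [this]

theorem pvOfList_filter_ne (l : List Int) (f : Int) :
    PySem.Set.ofList (l.filter (fun y => y != f))
      = PySem.Set.discard (PySem.Set.ofList l) f :=
  pvOfList_filter (fun y => y != f) l

theorem pvGroupRuns_spec (qs : List (String × Int))
    (h : qs.Pairwise (fun a b => a.2 ≤ b.2)) :
    pvGroupRuns qs
      = (PySem.Set.ofList (qs.map (·.2))).map
          (fun f => (f, (qs.filter (fun p => p.2 == f)).map Prod.fst)) := by
  induction qs using pvGroupRuns.induct with
  | case1 => simp [pvGroupRuns]
  | case2 c f rest ih =>
      rw [List.pairwise_cons] at h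
      have hqs' : ((c, f) :: rest).filter (fun p => p.2 != f)
          = rest.filter (fun p => p.2 != f) := by
        rw [List.filter_cons]; simp
      rw [pvGroupRuns]
      have hpw : (((c, f) :: rest).filter (fun p => p.2 != f)).Pairwise
          (fun a b => a.2 ≤ b.2) := by
        rw [hqs']
        exact h.2.filter _
      rw [ih hpw]
      rw [List.map_cons, PySem.Set.ofList_cons]
      rw [List.map_cons]
      congr 1
      -- the tails agree
      have hmapfilter : (((c, f) :: rest).filter (fun p => p.2 != f)).map (·.2)
          = (rest.map (·.2)).filter (fun y => y != f) := by
        rw [hqs', List.filter_map]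
        rfl
      rw [hmapfilter, pvOfList_filter_ne]
      apply List.map_congr_left
      intro g hg
      have hgf : g ≠ f := by
        have := (PySem.Set.mem_discard _ _ _).mp hg
        exact this.2
      rw [List.filter_filter]
      refine congrArg (fun l => (g, List.map Prod.fst l)) ?_
      apply List.filter_congr
      intro p _
      by_cases hp : p.2 = g <;> simp [hp, hgf]

-- strictly increasing nodup ordering of the frequency set
theorem pvOfList_sublist (l : List Int) : (PySem.Set.ofList l).Sublist l := by
  induction l with
  | nil => exact List.Sublist.refl _
  | cons x xs ih =>
      rw [PySem.Set.ofList_cons]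
      exact List.Sublist.cons₂ x (List.Sublist.trans List.filter_sublist ih)

-- ===== the main equivalence over an arbitrary pair list =====
theorem pvMain (ps : List (String × Int)) :
    (pvSortDictByKeys (ps.foldl pvBucketStep PySem.Dict.empty)).items
      = pvGroupRuns (PySem.List.sorted ps (fun p => p.2) false) := by
  set qs := PySem.List.sorted ps (fun p => p.2) false with hqs
  have hpair : qs.Pairwise (fun a b => a.2 ≤ b.2) := PySem.List.sorted_pairwise ps _
  have hbkeys : (ps.foldl pvBucketStep PySem.Dict.empty).keys
      = PySem.Set.ofList (ps.map (·.2)) := by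
    rw [pvBucket_keys]
    exact PySem.Set.update_empty _
  have hbnd : (ps.foldl pvBucketStep PySem.Dict.empty).keys.Nodup := by
    rw [hbkeys]; exact PySem.Set.nodup_ofList _
  rw [pvSortDictByKeys_items _ hbnd, hbkeys, pvGroupRuns_spec qs hpair]
  -- identify the two key lists
  have hperm : (PySem.Set.ofList (qs.map (·.2))).Perm (PySem.Set.ofList (ps.map (·.2))) := by
    apply (List.perm_ext_iff_of_nodup (PySem.Set.nodup_ofList _) (PySem.Set.nodup_ofList _)).mpr
    intro g
    rw [PySem.Set.mem_ofList, PySem.Set.mem_ofList]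
    constructor
    · intro hg
      rcases List.mem_map.mp hg with ⟨p, hp, hpe⟩
      exact List.mem_map.mpr ⟨p, (PySem.List.mem_sorted _ _ _ _).mp hp, hpe⟩
    · intro hg
      rcases List.mem_map.mp hg with ⟨p, hp, hpe⟩
      exact List.mem_map.mpr ⟨p, (PySem.List.mem_sorted _ _ _ _).mpr hp, hpe⟩
  have hlt : (PySem.Set.ofList (qs.map (·.2))).Pairwise (fun a b => a < b) := by
    have hle : (qs.map (·.2)).Pairwise (fun a b => a ≤ b) := List.pairwise_map.mpr hpair
    have hle' : (PySem.Set.ofList (qs.map (·.2))).Pairwise (fun a b => a ≤ b) :=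
      hle.sublist (pvOfList_sublist _)
    have hne : (PySem.Set.ofList (qs.map (·.2))).Pairwise (fun a b => a ≠ b) :=
      PySem.Set.nodup_ofList _
    exact (hle'.and hne).imp (fun h => lt_of_le_of_ne h.1 h.2)
  rw [PySem.List.sorted_eq_of_perm_of_pairwise_lt _ _ _ hperm hlt]
  apply List.map_congr_left
  intro g _
  rw [pvBucket_getD]
  rw [← pvSorted_filter ps g, ← hqs]
  simp

-- ===== VERDICT (by name: the statement is the Claim_ definition above) =====
theorem classifyCitiesByRoadFreq_spec : Claim_equal_classifyCitiesByRoadFreq := by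
  intro cities _ _
  unfold Spec_classifyCitiesByRoadFreq classifyCitiesByRoadFreq classifyCitiesByRoadFreq_alt
  rw [pvUpdA_eq_updB]
  exact pvMain _
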